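-- pv_equiv track=rewrite | github.com/LuciusLan/NegationProject | util.py | handle_eval_multi
-- ===== SOURCE A (Python) =====
-- def handle_eval_multi(scope_pred, scope_tar, cue_pred, cue_tar):
--     if len(scope_pred) == 1:
--         return [scope_pred], [scope_tar]
--     else:
--         cue_matches = []
--         for i, cp in enumerate(cue_pred):
--             match = -1
--             if isinstance(cp, list):
--                 for j, cg in enumerate(cue_tar):
--                     for c in cp:
--                         if cg[c] == 1:
--                             match = j
--                 cue_matches.append(match)
--         preds = []
--         tars = []
--         for i, cm in enumerate(cue_matches):
--             if cm == -1:
--                 # Predicting non-existing cue, mark all predicted scope token as false positive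
--                 preds.append(scope_pred[i])
--                 tars.append([2 for e in scope_pred[i]])
--             else:
--                 preds.append(scope_pred[i])
--                 tars.append(scope_tar[cm])
--         return preds, tars
-- ===== SOURCE B (Python) =====
-- def handle_eval_multi(scope_pred, scope_tar, cue_pred, cue_tar):
--     # For each distinct predicted cue position, scan that column of cue_tar once:
--     # best[c] = last j with cue_tar[j][c] == 1, or -1 if no row has a 1 there.
--     best = {}
--     for c in {c for cp in cue_pred for c in cp}:
--         m = -1
--         for j, cg in enumerate(cue_tar):
--             if cg[c] == 1:
--                 m = j
--         best[c] = m
--     preds = []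
--     tars = []
--     for i, cp in enumerate(cue_pred):
--         cm = max((best[c] for c in cp), default=-1)
--         preds.append(scope_pred[i])
--         tars.append([2] * len(scope_pred[i]) if cm == -1 else scope_tar[cm])
--     return preds, tars
-- ===== Notes on version B (the rewrite author's own statement) =====
-- stated objective: faster
-- what changed: Instead of rescanning all of cue_tar for every predicted cue, B scans each DISTINCT predicted cue position's column of cue_tar once into a position->last-matching-target-index table, then resolves each predicted cue as a max over table lookups.
-- outside the precondition, e.g. on handle_eval_multi([[]], [[]], [[]], [[]]): A returns ([[[]]], [[[]]]), B returns ([[]], [[]])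
import Mathlib
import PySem

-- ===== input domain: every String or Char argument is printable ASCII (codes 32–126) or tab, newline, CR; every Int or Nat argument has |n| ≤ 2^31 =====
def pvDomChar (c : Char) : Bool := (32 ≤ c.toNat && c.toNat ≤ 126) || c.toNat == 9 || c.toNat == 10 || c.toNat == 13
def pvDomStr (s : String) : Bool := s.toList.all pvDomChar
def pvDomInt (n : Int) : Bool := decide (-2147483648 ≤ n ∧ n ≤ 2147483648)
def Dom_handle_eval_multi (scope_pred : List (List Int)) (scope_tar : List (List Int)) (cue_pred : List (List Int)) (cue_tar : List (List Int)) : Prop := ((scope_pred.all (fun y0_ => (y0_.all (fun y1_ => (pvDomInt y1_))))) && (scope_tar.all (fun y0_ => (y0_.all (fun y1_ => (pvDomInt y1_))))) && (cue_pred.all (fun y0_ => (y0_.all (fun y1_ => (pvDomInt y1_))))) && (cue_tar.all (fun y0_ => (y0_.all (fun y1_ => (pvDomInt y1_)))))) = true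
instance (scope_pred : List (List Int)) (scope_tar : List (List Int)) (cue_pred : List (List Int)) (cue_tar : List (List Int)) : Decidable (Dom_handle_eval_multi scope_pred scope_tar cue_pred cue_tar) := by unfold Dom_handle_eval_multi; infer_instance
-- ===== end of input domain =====

-- B replaces A's per-prediction rescan of all of cue_tar by one column scan per DISTINCT
-- predicted cue position (a set), then a max over table lookups per predicted cue.

-- ===== PORT A =====
-- A's inner two loops: for j, cg in enumerate(cue_tar): for c in cp: if cg[c] == 1: match = j
def hemA_match (cue_tar : List (List Int)) (cp : List Int) : Int :=
  (PySem.List.enumerate cue_tar 0).foldl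
    (fun m jcg => cp.foldl (fun m c => if PySem.List.pyGet? jcg.2 c = some 1 then jcg.1 else m) m)
    (-1)

def handle_eval_multi (scope_pred : List (List Int)) (scope_tar : List (List Int)) (cue_pred : List (List Int)) (cue_tar : List (List Int)) : List (List Int) × List (List Int) :=
  -- Python returns the NESTED ([scope_pred], [scope_tar]) when len(scope_pred) == 1; that value
  -- is outside the declared return type and excluded by Pre_; the port returns (scope_pred, scope_tar) there.
  if scope_pred.length = 1 then (scope_pred, scope_tar)
  else
    -- isinstance(cp, list) is always true on the declared type List (List Int)
    let cue_matches := cue_pred.foldl (fun acc l => acc ++ [hemA_match cue_tar l]) ([] : List Int)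
    (PySem.List.enumerate cue_matches 0).foldl
      (fun pt icm =>
        if icm.2 = -1 then
          (pt.1 ++ [PySem.List.pyGetD scope_pred icm.1 []],
           pt.2 ++ [(PySem.List.pyGetD scope_pred icm.1 []).map (fun _ => (2 : Int))])
        else
          (pt.1 ++ [PySem.List.pyGetD scope_pred icm.1 []],
           pt.2 ++ [PySem.List.pyGetD scope_tar icm.2 []]))
      (([] : List (List Int)), ([] : List (List Int)))

-- ===== PORT B =====
-- best[c] = last j with cue_tar[j][c] == 1 (else -1), one column scan per distinct cue position
-- ({c for cp in cue_pred for c in cp} is PySem.Set.ofList; best values do not depend on its order)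
def hemB_best (cue_pred : List (List Int)) (cue_tar : List (List Int)) : PySem.Dict Int Int :=
  (PySem.Set.ofList (cue_pred.flatMap (fun cp => cp))).foldl
    (fun best c =>
      best.insert c
        ((PySem.List.enumerate cue_tar 0).foldl
          (fun m jcg => if PySem.List.pyGet? jcg.2 c = some 1 then jcg.1 else m) (-1)))
    PySem.Dict.empty

def handle_eval_multi_alt (scope_pred : List (List Int)) (scope_tar : List (List Int)) (cue_pred : List (List Int)) (cue_tar : List (List Int)) : List (List Int) × List (List Int) :=
  let best := hemB_best cue_pred cue_tar
  (PySem.List.enumerate cue_pred 0).foldl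
    (fun pt icp =>
      -- best[c] never misses: every c of icp.2 was inserted; getD is Python's best[c] here
      let cm := icp.2.foldl (fun m c => max m (best.getD c (-1))) (-1)
      (pt.1 ++ [PySem.List.pyGetD scope_pred icp.1 []],
       pt.2 ++ [if cm = -1 then List.replicate (PySem.List.pyGetD scope_pred icp.1 []).length (2 : Int)
                else PySem.List.pyGetD scope_tar cm []]))
    (([] : List (List Int)), ([] : List (List Int)))

-- ===== PRECONDITION & SPEC =====
-- Pre_ excludes (a) scope_pred of length exactly 1, where Python A returns the nested
-- ([scope_pred], [scope_tar]) — not a value of the declared return type — and (b) inputs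
-- where Python A raises IndexError: a cue position out of range for some cue_tar row,
-- more cue_pred rows than scope_pred rows, or a matching target index not below len(scope_tar).
def Pre_handle_eval_multi (scope_pred : List (List Int)) (scope_tar : List (List Int)) (cue_pred : List (List Int)) (cue_tar : List (List Int)) : Prop :=
  scope_pred.length ≠ 1 ∧ cue_pred.length ≤ scope_pred.length ∧
  (∀ l ∈ cue_pred, ∀ c ∈ l, ∀ cg ∈ cue_tar, PySem.Raise.InRange cg.length c) ∧
  (∀ l ∈ cue_pred, ∀ jcg ∈ PySem.List.enumerate cue_tar 0,
      (∃ c ∈ l, PySem.List.pyGet? jcg.2 c = some 1) → jcg.1 < (scope_tar.length : Int))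
instance (scope_pred : List (List Int)) (scope_tar : List (List Int)) (cue_pred : List (List Int)) (cue_tar : List (List Int)) : Decidable (Pre_handle_eval_multi scope_pred scope_tar cue_pred cue_tar) := by unfold Pre_handle_eval_multi; infer_instance

def pvWitness_handle_eval_multi : List (List Int) × List (List Int) × List (List Int) × List (List Int) :=
  ([[1, 0], [0, 1]], [[1, 1]], [[0]], [[1, 0]])

def Spec_handle_eval_multi (scope_pred : List (List Int)) (scope_tar : List (List Int)) (cue_pred : List (List Int)) (cue_tar : List (List Int)) (out : List (List Int) × List (List Int)) : Prop := out = handle_eval_multi_alt scope_pred scope_tar cue_pred cue_tar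
instance (scope_pred : List (List Int)) (scope_tar : List (List Int)) (cue_pred : List (List Int)) (cue_tar : List (List Int)) (out : List (List Int) × List (List Int)) : Decidable (Spec_handle_eval_multi scope_pred scope_tar cue_pred cue_tar out) := by unfold Spec_handle_eval_multi; infer_instance

-- ===== CLAIM (what is proved, stated in full; the proofs are below) =====
def Claim_equal_handle_eval_multi : Prop := ∀ (scope_pred : List (List Int)) (scope_tar : List (List Int)) (cue_pred : List (List Int)) (cue_tar : List (List Int)), Dom_handle_eval_multi scope_pred scope_tar cue_pred cue_tar → Pre_handle_eval_multi scope_pred scope_tar cue_pred cue_tar → Spec_handle_eval_multi scope_pred scope_tar cue_pred cue_tar (handle_eval_multi scope_pred scope_tar cue_pred cue_tar)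

-- ===== LEMMAS AND PROOFS =====

-- A's innermost loop: last-wins with a constant written value j
theorem hem_fold_const {l : List Int} {cg : List Int} {j m : Int} :
    l.foldl (fun m c => if PySem.List.pyGet? cg c = some 1 then j else m) m
      = if (∃ c ∈ l, PySem.List.pyGet? cg c = some 1) then j else m := by
  induction l generalizing m with
  | nil => simp
  | cons x xs ih =>
    simp only [List.foldl_cons, ih]
    by_cases hx : PySem.List.pyGet? cg x = some 1 <;> by_cases hxs : (∃ c ∈ xs, PySem.List.pyGet? cg c = some 1) <;>
      simp [hx, hxs]

-- the value of an "if hit then index else acc" fold is the init or one of the indices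
theorem hem_fold_mem {α : Type} (P : Int × α → Prop) [DecidablePred P] :
    ∀ (E : List (Int × α)) (m0 : Int),
      E.foldl (fun m p => if P p then p.1 else m) m0 = m0 ∨
        ∃ p ∈ E, E.foldl (fun m p => if P p then p.1 else m) m0 = p.1 := by
  intro E
  induction E with
  | nil => intro m0; left; rfl
  | cons q E ih =>
    intro m0
    simp only [List.foldl_cons]
    by_cases hq : P q
    · rcases ih q.1 with h | ⟨p, hp, h⟩
      · right; exact ⟨q, by simp, by simp [hq, h]⟩
      · right; exact ⟨p, by simp [hp], by simp [hq, h]⟩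
    · rcases ih m0 with h | ⟨p, hp, h⟩
      · left; simpa [hq] using h
      · right; exact ⟨p, by simp [hp], by simpa [hq] using h⟩

-- looking up the per-column table built by B's first loop
theorem hem_table_getD (F : Int → Int) :
    ∀ (S : List Int) (d : PySem.Dict Int Int) (c : Int),
      ((S.foldl (fun best x => best.insert x (F x)) d).getD c (-1))
        = if c ∈ S then F c else d.getD c (-1) := by
  intro S
  induction S with
  | nil => intro d c; simp
  | cons x S ih =>
    intro d c
    simp only [List.foldl_cons]
    rw [ih]
    by_cases hc : c ∈ S
    · rw [if_pos hc, if_pos (List.mem_cons_of_mem _ hc)]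
    · rw [if_neg hc, PySem.Dict.getD_insert]
      by_cases hcx : c = x
      · subst hcx
        rw [if_pos rfl, if_pos (by simp)]
      · rw [if_neg hcx, if_neg (by simp [hcx, hc])]

-- bounds on an "if hit then index else acc" fold
theorem hem_fold_bounds {α : Type} (P : Int × α → Prop) [DecidablePred P]
    (E : List (Int × α)) (n : Int) (hE : ∀ p ∈ E, 0 ≤ p.1 ∧ p.1 < n) (hn : -1 < n) :
    -1 ≤ E.foldl (fun m p => if P p then p.1 else m) (-1) ∧
      E.foldl (fun m p => if P p then p.1 else m) (-1) < n := by
  rcases hem_fold_mem P E (-1) with h | ⟨p, hp, h⟩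
  · rw [h]; omega
  · rw [h]; have := hE p hp; omega

theorem hem_foldl_max_le {l : List Int} {g : Int → Int} {m0 n : Int}
    (h0 : m0 ≤ n) (hg : ∀ c ∈ l, g c ≤ n) :
    l.foldl (fun m c => max m (g c)) m0 ≤ n := by
  induction l generalizing m0 with
  | nil => simpa using h0
  | cons x xs ih =>
    simp only [List.foldl_cons]
    exact ih (max_le h0 (hg x (by simp))) (fun c hc => hg c (by simp [hc]))

theorem hem_foldl_max_ge {l : List Int} {g : Int → Int} {m0 : Int} {c : Int} (hc : c ∈ l) :
    g c ≤ l.foldl (fun m c => max m (g c)) m0 := by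
  induction l generalizing m0 with
  | nil => simp at hc
  | cons x xs ih =>
    simp only [List.foldl_cons]
    rcases List.mem_cons.1 hc with rfl | hc'
    · -- g c ≤ foldl starting from max m0 (g c); the fold only grows its init
      have grow : ∀ (ys : List Int) (a b : Int), a ≤ b → a ≤ ys.foldl (fun m c => max m (g c)) b := by
        intro ys
        induction ys with
        | nil => intro a b h; simpa using h
        | cons y ys ihy =>
          intro a b h
          simp only [List.foldl_cons]
          exact ihy a (max b (g y)) (le_trans h (le_max_left _ _))
      exact grow xs (g c) (max m0 (g c)) (le_max_right _ _)
    · exact ih hc'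

theorem hem_foldl_max_eq {l : List Int} {g : Int → Int} {m0 n : Int}
    (h0 : m0 ≤ n) (hle : ∀ c ∈ l, g c ≤ n) (hex : ∃ c ∈ l, g c = n) :
    l.foldl (fun m c => max m (g c)) m0 = n := by
  rcases hex with ⟨c, hc, hgc⟩
  exact le_antisymm (hem_foldl_max_le h0 hle) (hgc ▸ hem_foldl_max_ge hc)

-- the crux: last-wins over target rows = max over per-position column scans
theorem hem_key (l : List Int) :
    ∀ (E : List (Int × List Int)), (∀ p ∈ E, 0 ≤ p.1) → E.Pairwise (fun p q => p.1 < q.1) →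
      E.foldl (fun m jcg => if (∃ c ∈ l, PySem.List.pyGet? jcg.2 c = some 1) then jcg.1 else m) (-1)
        = l.foldl (fun m c =>
            max m (E.foldl (fun m jcg => if PySem.List.pyGet? jcg.2 c = some 1 then jcg.1 else m) (-1))) (-1) := by
  intro E
  induction E using List.reverseRecOn with
  | nil =>
    intro _ _
    simp only [List.foldl_nil]
    have : ∀ (xs : List Int) (m0 : Int), -1 ≤ m0 → xs.foldl (fun m _ => max m (-1)) m0 = m0 := by
      intro xs
      induction xs with
      | nil => intro m0 _; rfl
      | cons x xs ih => intro m0 h; simp only [List.foldl_cons]; rw [max_eq_left h]; exact ih m0 h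
    exact (this l (-1) le_rfl).symm
  | append_singleton E q ih =>
    intro hpos hsort
    have hposE : ∀ p ∈ E, 0 ≤ p.1 := fun p hp => hpos p (by simp [hp])
    have hsortE : E.Pairwise (fun p q => p.1 < q.1) := (List.pairwise_append.1 hsort).1
    have hlt : ∀ p ∈ E, p.1 < q.1 := by
      intro p hp
      exact (List.pairwise_append.1 hsort).2.2 p hp q (by simp)
    have hq0 : 0 ≤ q.1 := hpos q (by simp)
    rw [List.foldl_append, List.foldl_cons, List.foldl_nil]
    by_cases hhit : (∃ c ∈ l, PySem.List.pyGet? q.2 c = some 1)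
    · simp only [if_pos hhit]
      rcases hhit with ⟨c0, hc0, hgc0⟩
      refine (hem_foldl_max_eq (by omega) ?_ ?_).symm
      · intro c _
        rw [List.foldl_append, List.foldl_cons, List.foldl_nil]
        have hb := hem_fold_bounds (fun p => PySem.List.pyGet? p.2 c = some 1) E q.1
          (fun p hp => ⟨hposE p hp, hlt p hp⟩) (by omega)
        simp only [] at hb
        split
        · exact le_rfl
        · omega
      · refine ⟨c0, hc0, ?_⟩
        rw [List.foldl_append, List.foldl_cons, List.foldl_nil, if_pos hgc0]
    · simp only [if_neg hhit]
      rw [ih hposE hsortE]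
      refine PySem.List.foldl_congr_mem _ _ _ _ ?_
      intro m c hc
      rw [List.foldl_append, List.foldl_cons, List.foldl_nil]
      have : ¬ PySem.List.pyGet? q.2 c = some 1 := fun h => hhit ⟨c, hc, h⟩
      rw [if_neg this]

-- A's match for one predicted cue equals B's max-over-lookups for it
theorem hem_match_eq (cue_pred : List (List Int)) (cue_tar : List (List Int)) (l : List Int)
    (hl : l ∈ cue_pred) :
    hemA_match cue_tar l
      = l.foldl (fun m c => max m ((hemB_best cue_pred cue_tar).getD c (-1))) (-1) := by
  unfold hemA_match hemB_best
  have step : ∀ m : Int, ∀ jcg : Int × List Int,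
      l.foldl (fun m c => if PySem.List.pyGet? jcg.2 c = some 1 then jcg.1 else m) m
        = if (∃ c ∈ l, PySem.List.pyGet? jcg.2 c = some 1) then jcg.1 else m := by
    intro m jcg; exact hem_fold_const
  rw [PySem.List.foldl_congr_mem _ _ _ _ (fun m jcg _ => step m jcg)]
  rw [hem_key l (PySem.List.enumerate cue_tar 0)
      (by
        intro p hp
        rcases (PySem.List.mem_enumerate_iff _ _ _).1 hp with ⟨k, hk, rfl⟩
        simp)
      (PySem.List.pairwise_lt_enumerate _ _)]
  refine PySem.List.foldl_congr_mem _ _ _ _ ?_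
  intro m c hc
  rw [hem_table_getD]
  rw [if_pos ((PySem.Set.mem_ofList _ _).2 (List.mem_flatMap.2 ⟨l, hl, hc⟩))]

-- a fold appending one element to each component is a pair of maps
theorem hem_pair_fold {α : Type} (L : List α) (f g : α → List Int) :
    ∀ (p0 t0 : List (List Int)),
      L.foldl (fun pt x => (pt.1 ++ [f x], pt.2 ++ [g x])) (p0, t0) = (p0 ++ L.map f, t0 ++ L.map g) := by
  induction L with
  | nil => intro p0 t0; simp
  | cons x L ih => intro p0 t0; simp [ih]

-- ===== VERDICT (by name: the statement is the Claim_ definition above) =====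
theorem handle_eval_multi_spec : Claim_equal_handle_eval_multi := by
  intro scope_pred scope_tar cue_pred cue_tar _ hpre
  rcases hpre with ⟨hne1, _, _, _⟩
  unfold Spec_handle_eval_multi handle_eval_multi handle_eval_multi_alt
  rw [if_neg hne1]
  -- A's cue_matches list
  rw [PySem.List.foldl_append_singleton_eq_map]
  -- A's assembly fold as a pair of maps
  have hstepA : (fun (pt : List (List Int) × List (List Int)) (icm : Int × Int) =>
      if icm.2 = -1 then
        (pt.1 ++ [PySem.List.pyGetD scope_pred icm.1 []],
         pt.2 ++ [(PySem.List.pyGetD scope_pred icm.1 []).map (fun _ => (2 : Int))])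
      else
        (pt.1 ++ [PySem.List.pyGetD scope_pred icm.1 []],
         pt.2 ++ [PySem.List.pyGetD scope_tar icm.2 []]))
    = (fun pt icm =>
        (pt.1 ++ [PySem.List.pyGetD scope_pred icm.1 []],
         pt.2 ++ [if icm.2 = -1 then (PySem.List.pyGetD scope_pred icm.1 []).map (fun _ => (2 : Int))
                  else PySem.List.pyGetD scope_tar icm.2 []])) := by
    funext pt icm; split <;> rfl
  rw [hstepA, hem_pair_fold]
  -- B's assembly fold as a pair of maps
  rw [hem_pair_fold (PySem.List.enumerate cue_pred 0)
      (fun icp => PySem.List.pyGetD scope_pred icp.1 [])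
      (fun icp =>
        if (icp.2.foldl (fun m c => max m ((hemB_best cue_pred cue_tar).getD c (-1))) (-1)) = -1
        then List.replicate (PySem.List.pyGetD scope_pred icp.1 []).length (2 : Int)
        else PySem.List.pyGetD scope_tar
          (icp.2.foldl (fun m c => max m ((hemB_best cue_pred cue_tar).getD c (-1))) (-1)) [])]
  simp only [List.nil_append]
  have hlene : (PySem.List.enumerate (cue_pred.map (hemA_match cue_tar)) 0).length = cue_pred.length := by
    rw [PySem.List.length_enumerate, List.length_map]
  have hlene' : (PySem.List.enumerate cue_pred 0).length = cue_pred.length := by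
    rw [PySem.List.length_enumerate]
  rw [Prod.mk.injEq]
  constructor
  · -- preds component
    apply List.ext_getElem
    · simp [hlene, hlene']
    · intro i h1 h2
      simp only [List.getElem_map]
      rw [PySem.List.getElem_enumerate, PySem.List.getElem_enumerate]
  · -- tars component
    apply List.ext_getElem
    · simp [hlene, hlene']
    · intro i h1 h2
      simp only [List.getElem_map]
      have hi : i < cue_pred.length := by
        have := h2
        simpa [hlene'] using this
      rw [PySem.List.getElem_enumerate, PySem.List.getElem_enumerate]
      simp only [List.getElem_map]
      rw [hem_match_eq cue_pred cue_tar _ (List.getElem_mem hi)]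
      split
      · exact List.map_const'
      · rfl
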